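-- pv_equiv track=rewrite | github.com/LURKS02/algorithm | algorithm/프로그래머스/공 이동 시뮬레이션.py | solution
-- ===== SOURCE A (Python) =====
-- def solution(n, m, x, y, queries):
--     sx, sy = x, y
--     ex, ey = x, y
--
--     for i in range(len(queries)-1, -1, -1):
--         dir, dx = queries[i][0], queries[i][1]
--
--         if dir == 0:
--             nsy, ney = -1, -1
--             if sy == 0:
--                 nsy = 0
--             else:
--                 nsy = sy + dx
--             ney = ey + dx
--
--             if 0 <= nsy < m and 0 <= ney < m:
--                 sy = nsy
--                 ey = ney
--             elif 0 <= nsy < m: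
--                 sy = nsy
--                 ey = min(ney, m-1)
--             else:
--                 return 0
--
--         elif dir == 1:
--             nsy, ney = -1, -1
--
--             nsy = sy - dx
--             if ey == m-1:
--                 ney = m-1
--             else:
--                 ney = ey - dx
--
--             if 0 <= nsy < m and 0 <= ney < m:
--                 sy = nsy
--                 ey = ney
--             elif 0 <= ney < m:
--                 ey = ney
--                 sy = max(0, nsy)
--             else:
--                 return 0
--
--         elif dir == 2:
--             nsx, nex = -1, -1
--             if sx == 0:
--                 nsx = 0
--             else:
--                 nsx = sx + dx
--             nex = ex + dx
--
--             if 0 <= nsx < n and 0 <= nex < n: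
--                 sx = nsx
--                 ex = nex
--             elif 0 <= nsx < n:
--                 sx = nsx
--                 ex = min(nex, n-1)
--             else:
--                 return 0
--
--         else:
--             nsx, nex = -1, -1
--             nsx = sx - dx
--             if ex == n-1:
--                 nex = n-1
--             else:
--                 nex = ex - dx
--
--             if 0 <= nsx < n and 0 <= nex < n:
--                 sx = nsx
--                 ex = nex
--             elif 0 <= nex < n:
--                 sx = max(0, nsx)
--                 ex = nex
--             else:
--                 return 0
--
--     return (ex - sx + 1) * (ey - sy + 1)
-- ===== SOURCE B (Python) =====
-- def solution(n, m, x, y, queries):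
--     # The two endpoints of each axis's interval evolve independently in the
--     # reverse pass, and each infeasibility test reads only one endpoint, so
--     # compute four independent scalar trajectories (lower/upper per axis),
--     # each with a one-line update and a monotone ok-flag, then combine.
--     xq = [(q[0] == 2, q[1]) for q in reversed(queries) if q[0] not in (0, 1)]
--     yq = [(q[0] == 0, q[1]) for q in reversed(queries) if q[0] in (0, 1)]
--
--     def lower(qs, start, size):
--         v, ok = start, True
--         for plus, dx in qs:
--             if plus:
--                 if v != 0:
--                     v += dx
--                 ok = ok and 0 <= v < size
--             else:
--                 v = max(0, v - dx)
--         return v, ok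
--
--     def upper(qs, start, size):
--         v, ok = start, True
--         for plus, dx in qs:
--             if plus:
--                 v = min(v + dx, size - 1)
--             else:
--                 if v != size - 1:
--                     v -= dx
--                 ok = ok and 0 <= v < size
--         return v, ok
--
--     sx, ok1 = lower(xq, x, n)
--     ex, ok2 = upper(xq, x, n)
--     sy, ok3 = lower(yq, y, m)
--     ey, ok4 = upper(yq, y, m)
--     if ok1 and ok2 and ok3 and ok4:
--         return (ex - sx + 1) * (ey - sy + 1)
--     return 0
-- ===== Notes on version B (the rewrite author's own statement) =====
-- stated objective: alternative
-- what changed: B drops A's single coupled 4-state reverse loop with early returns and three-way joint-range branches: since each interval endpoint evolves independently and each infeasibility test reads only one endpoint, B computes four independent scalar endpoint trajectories (lower/upper per axis) as plain folds with one-line updates and a monotone ok-flag, then combines them at the end.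
-- outside the precondition, e.g. on solution(2, 2, 0, 1, [[2], [0, 5]]): A returns 0, B raises IndexError
import Mathlib
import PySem

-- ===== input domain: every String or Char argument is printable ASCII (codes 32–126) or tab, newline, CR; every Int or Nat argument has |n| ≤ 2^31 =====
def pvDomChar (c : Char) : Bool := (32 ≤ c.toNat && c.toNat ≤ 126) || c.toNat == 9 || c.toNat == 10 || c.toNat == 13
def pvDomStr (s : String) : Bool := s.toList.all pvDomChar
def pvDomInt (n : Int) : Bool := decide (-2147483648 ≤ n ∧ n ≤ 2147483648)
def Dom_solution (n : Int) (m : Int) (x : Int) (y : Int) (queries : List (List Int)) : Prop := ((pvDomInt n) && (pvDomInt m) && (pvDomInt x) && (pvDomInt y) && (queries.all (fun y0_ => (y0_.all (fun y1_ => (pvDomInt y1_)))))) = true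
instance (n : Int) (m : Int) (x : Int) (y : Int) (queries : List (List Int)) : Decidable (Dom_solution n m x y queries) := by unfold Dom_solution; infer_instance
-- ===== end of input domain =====

-- B replaces A's single coupled 4-state reverse loop (three-way joint-range branches,
-- early return) by four independent per-endpoint scalar folds with a monotone ok-flag.


-- ===== PORT A =====
-- q[0] / q[1]: indices are in range on every input admitted by Pre_solution,
-- so the `.getD 0` default is never used there.
def pvGetQ (q : List Int) (i : Int) : Int := (PySem.List.pyGet? q i).getD 0

-- A's `for i in range(len(queries)-1, -1, -1)` loop, transcribed as structural
-- recursion over the reversed list, head = last query; early `return 0` stays 0.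
def pvA_loop (n m : Int) : List (List Int) → Int → Int → Int → Int → Int
  | [], sx, ex, sy, ey => (ex - sx + 1) * (ey - sy + 1)
  | q :: rest, sx, ex, sy, ey =>
    let dir := pvGetQ q 0
    let dx := pvGetQ q 1
    if dir == 0 then
      let nsy := if sy == 0 then 0 else sy + dx
      let ney := ey + dx
      if 0 ≤ nsy ∧ nsy < m ∧ 0 ≤ ney ∧ ney < m then pvA_loop n m rest sx ex nsy ney
      else if 0 ≤ nsy ∧ nsy < m then pvA_loop n m rest sx ex nsy (min ney (m - 1))
      else 0
    else if dir == 1 then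
      let nsy := sy - dx
      let ney := if ey == m - 1 then m - 1 else ey - dx
      if 0 ≤ nsy ∧ nsy < m ∧ 0 ≤ ney ∧ ney < m then pvA_loop n m rest sx ex nsy ney
      else if 0 ≤ ney ∧ ney < m then pvA_loop n m rest sx ex (max 0 nsy) ney
      else 0
    else if dir == 2 then
      let nsx := if sx == 0 then 0 else sx + dx
      let nex := ex + dx
      if 0 ≤ nsx ∧ nsx < n ∧ 0 ≤ nex ∧ nex < n then pvA_loop n m rest nsx nex sy ey
      else if 0 ≤ nsx ∧ nsx < n then pvA_loop n m rest nsx (min nex (n - 1)) sy ey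
      else 0
    else
      let nsx := sx - dx
      let nex := if ex == n - 1 then n - 1 else ex - dx
      if 0 ≤ nsx ∧ nsx < n ∧ 0 ≤ nex ∧ nex < n then pvA_loop n m rest nsx nex sy ey
      else if 0 ≤ nex ∧ nex < n then pvA_loop n m rest (max 0 nsx) nex sy ey
      else 0

def solution (n : Int) (m : Int) (x : Int) (y : Int) (queries : List (List Int)) : Int :=
  pvA_loop n m queries.reverse x x y y

-- ===== PORT B =====
-- B's q[0]/q[1] access; in range on every input admitted by Pre_solution.
def pvB_getQ (q : List Int) (i : Int) : Int := (PySem.List.pyGet? q i).getD 0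

-- one step of the lower-endpoint fold: body of B's `lower` loop
def pvB_lowerStep (size : Int) (s : Int × Bool) (q : Bool × Int) : Int × Bool :=
  if q.1 then
    let v := if s.1 == 0 then s.1 else s.1 + q.2
    (v, s.2 && decide (0 ≤ v ∧ v < size))
  else
    (max 0 (s.1 - q.2), s.2)

-- B's `lower(qs, start, size)`
def pvB_lower (qs : List (Bool × Int)) (start size : Int) : Int × Bool :=
  qs.foldl (pvB_lowerStep size) (start, true)

-- one step of the upper-endpoint fold: body of B's `upper` loop
def pvB_upperStep (size : Int) (s : Int × Bool) (q : Bool × Int) : Int × Bool :=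
  if q.1 then
    (min (s.1 + q.2) (size - 1), s.2)
  else
    let v := if s.1 == size - 1 then s.1 else s.1 - q.2
    (v, s.2 && decide (0 ≤ v ∧ v < size))

-- B's `upper(qs, start, size)`
def pvB_upper (qs : List (Bool × Int)) (start size : Int) : Int × Bool :=
  qs.foldl (pvB_upperStep size) (start, true)

def pvB_isY (q : List Int) : Bool := pvB_getQ q 0 == 0 || pvB_getQ q 0 == 1

def solution_alt (n : Int) (m : Int) (x : Int) (y : Int) (queries : List (List Int)) : Int :=
  let xq := (queries.reverse.filter (fun q => !pvB_isY q)).map (fun q => (pvB_getQ q 0 == 2, pvB_getQ q 1))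
  let yq := (queries.reverse.filter pvB_isY).map (fun q => (pvB_getQ q 0 == 0, pvB_getQ q 1))
  let l1 := pvB_lower xq x n
  let u1 := pvB_upper xq x n
  let l2 := pvB_lower yq y m
  let u2 := pvB_upper yq y m
  if l1.2 && u1.2 && l2.2 && u2.2 then (u1.1 - l1.1 + 1) * (u2.1 - l2.1 + 1) else 0

-- ===== PRECONDITION & SPEC =====
-- Pre_ excludes query lists containing an entry with fewer than 2 elements: on
-- those A raises IndexError, except when a query processed earlier in A's reverse
-- pass already fails so A returns 0 while B's comprehension still reaches the
-- short entry and raises.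
def Pre_solution (n : Int) (m : Int) (x : Int) (y : Int) (queries : List (List Int)) : Prop :=
  ∀ q ∈ queries, 2 ≤ q.length
instance (n : Int) (m : Int) (x : Int) (y : Int) (queries : List (List Int)) : Decidable (Pre_solution n m x y queries) := by unfold Pre_solution; infer_instance

def pvWitness_solution : Int × Int × Int × Int × List (List Int) := (2, 2, 0, 0, [[0, 1], [3, 0]])

def Spec_solution (n : Int) (m : Int) (x : Int) (y : Int) (queries : List (List Int)) (out : Int) : Prop := out = solution_alt n m x y queries
instance (n : Int) (m : Int) (x : Int) (y : Int) (queries : List (List Int)) (out : Int) : Decidable (Spec_solution n m x y queries out) := by unfold Spec_solution; infer_instance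

-- ===== CLAIM (what is proved, stated in full; the proofs are below) =====
def Claim_equal_solution : Prop := ∀ (n : Int) (m : Int) (x : Int) (y : Int) (queries : List (List Int)), Dom_solution n m x y queries → Pre_solution n m x y queries → Spec_solution n m x y queries (solution n m x y queries)

-- ===== LEMMAS AND PROOFS =====

theorem pvB_getQ_eq (q : List Int) (i : Int) : pvB_getQ q i = pvGetQ q i := rfl

-- the fold's value component ignores the ok-flag, and the ok-flag factors out
theorem pv_lower_fst (size : Int) (qs : List (Bool × Int)) :
    ∀ (v : Int) (b b' : Bool),
      (qs.foldl (pvB_lowerStep size) (v, b)).1 = (qs.foldl (pvB_lowerStep size) (v, b')).1 := by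
  induction qs with
  | nil => intro v b b'; rfl
  | cons q rest ih =>
    intro v b b'
    simp only [List.foldl_cons, pvB_lowerStep]
    split_ifs <;> exact ih _ _ _

theorem pv_lower_snd (size : Int) (qs : List (Bool × Int)) :
    ∀ (v : Int) (b : Bool),
      (qs.foldl (pvB_lowerStep size) (v, b)).2 = (b && (qs.foldl (pvB_lowerStep size) (v, true)).2) := by
  induction qs with
  | nil => intro v b; simp
  | cons q rest ih =>
    intro v b
    simp only [List.foldl_cons, pvB_lowerStep]
    split_ifs
    all_goals first
      | exact ih _ _
      | · conv_lhs => rw [ih]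
          conv_rhs => rw [ih]
          simp [Bool.and_assoc]

theorem pv_upper_fst (size : Int) (qs : List (Bool × Int)) :
    ∀ (v : Int) (b b' : Bool),
      (qs.foldl (pvB_upperStep size) (v, b)).1 = (qs.foldl (pvB_upperStep size) (v, b')).1 := by
  induction qs with
  | nil => intro v b b'; rfl
  | cons q rest ih =>
    intro v b b'
    simp only [List.foldl_cons, pvB_upperStep]
    split_ifs <;> exact ih _ _ _

theorem pv_upper_snd (size : Int) (qs : List (Bool × Int)) :
    ∀ (v : Int) (b : Bool),
      (qs.foldl (pvB_upperStep size) (v, b)).2 = (b && (qs.foldl (pvB_upperStep size) (v, true)).2) := by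
  induction qs with
  | nil => intro v b; simp
  | cons q rest ih =>
    intro v b
    simp only [List.foldl_cons, pvB_upperStep]
    split_ifs
    all_goals first
      | exact ih _ _
      | · conv_lhs => rw [ih]
          conv_rhs => rw [ih]
          simp [Bool.and_assoc]

-- the RHS of the invariant: B's combination, from arbitrary endpoint starts
def pvB_run (n m : Int) (qs : List (List Int)) (sx ex sy ey : Int) : Int :=
  let xq := (qs.filter (fun q => !pvB_isY q)).map (fun q => (pvB_getQ q 0 == 2, pvB_getQ q 1))
  let yq := (qs.filter pvB_isY).map (fun q => (pvB_getQ q 0 == 0, pvB_getQ q 1))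
  let l1 := pvB_lower xq sx n
  let u1 := pvB_upper xq ex n
  let l2 := pvB_lower yq sy m
  let u2 := pvB_upper yq ey m
  if l1.2 && u1.2 && l2.2 && u2.2 then (u1.1 - l1.1 + 1) * (u2.1 - l2.1 + 1) else 0

-- one cons step of pvB_run, for each of the four query kinds
theorem pvB_run_cons_yplus (n m : Int) (q : List Int) (rest : List (List Int))
    (sx ex sy ey : Int) (h : pvB_getQ q 0 = 0) :
    pvB_run n m (q :: rest) sx ex sy ey =
      (let dx := pvB_getQ q 1
       let nsy := if sy = 0 then sy else sy + dx
       if 0 ≤ nsy ∧ nsy < m then pvB_run n m rest sx ex nsy (min (ey + dx) (m - 1)) else 0) := by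
  have hY : pvB_isY q = true := by simp [pvB_isY, h]
  have h0 : (pvB_getQ q 0 == (0 : Int)) = true := by simp [h]
  simp only [pvB_run, List.filter_cons, hY, Bool.not_true, Bool.false_eq_true, if_true,
    if_false, List.map_cons, pvB_lower, pvB_upper, List.foldl_cons, pvB_lowerStep,
    pvB_upperStep, h0, ite_true]
  rw [pv_lower_fst m _ _ _ true, pv_lower_snd m]
  simp only [beq_iff_eq]
  by_cases hc : 0 ≤ (if sy = 0 then sy else sy + pvB_getQ q 1) ∧
      (if sy = 0 then sy else sy + pvB_getQ q 1) < m
  · obtain ⟨hc1, hc2⟩ := hc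
    simp [hc1, hc2, pvB_run, pvB_lower, pvB_upper]
  · have hcf : (decide (0 ≤ if sy = 0 then sy else sy + pvB_getQ q 1) &&
        decide ((if sy = 0 then sy else sy + pvB_getQ q 1) < m)) = false := by
      by_cases h1 : 0 ≤ if sy = 0 then sy else sy + pvB_getQ q 1
      · by_cases h2 : (if sy = 0 then sy else sy + pvB_getQ q 1) < m
        · exact absurd ⟨h1, h2⟩ hc
        · simp [h2]
      · simp [h1]
    simp [hcf, hc]

theorem pvB_run_cons_yminus (n m : Int) (q : List Int) (rest : List (List Int))
    (sx ex sy ey : Int) (h : pvB_getQ q 0 = 1) :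
    pvB_run n m (q :: rest) sx ex sy ey =
      (let dx := pvB_getQ q 1
       let ney := if ey = m - 1 then ey else ey - dx
       if 0 ≤ ney ∧ ney < m then pvB_run n m rest sx ex (max 0 (sy - dx)) ney else 0) := by
  have hY : pvB_isY q = true := by simp [pvB_isY, h]
  have h0 : (pvB_getQ q 0 == (0 : Int)) = false := by simp [h]
  simp only [pvB_run, List.filter_cons, hY, Bool.not_true, Bool.false_eq_true, if_true,
    if_false, List.map_cons, pvB_lower, pvB_upper, List.foldl_cons, pvB_lowerStep,
    pvB_upperStep, h0, ite_false, Bool.false_eq_true]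
  rw [pv_upper_fst m _ _ _ true, pv_upper_snd m]
  simp only [beq_iff_eq]
  by_cases hc : 0 ≤ (if ey = m - 1 then ey else ey - pvB_getQ q 1) ∧
      (if ey = m - 1 then ey else ey - pvB_getQ q 1) < m
  · obtain ⟨hc1, hc2⟩ := hc
    simp [hc1, hc2, pvB_run, pvB_lower, pvB_upper]
  · have hcf : (decide (0 ≤ if ey = m - 1 then ey else ey - pvB_getQ q 1) &&
        decide ((if ey = m - 1 then ey else ey - pvB_getQ q 1) < m)) = false := by
      by_cases h1 : 0 ≤ if ey = m - 1 then ey else ey - pvB_getQ q 1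
      · by_cases h2 : (if ey = m - 1 then ey else ey - pvB_getQ q 1) < m
        · exact absurd ⟨h1, h2⟩ hc
        · simp [h2]
      · simp [h1]
    simp [hcf, hc]

theorem pvB_run_cons_xplus (n m : Int) (q : List Int) (rest : List (List Int))
    (sx ex sy ey : Int) (hY : pvB_isY q = false) (h : pvB_getQ q 0 = 2) :
    pvB_run n m (q :: rest) sx ex sy ey =
      (let dx := pvB_getQ q 1
       let nsx := if sx = 0 then sx else sx + dx
       if 0 ≤ nsx ∧ nsx < n then pvB_run n m rest nsx (min (ex + dx) (n - 1)) sy ey else 0) := by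
  have h0 : (pvB_getQ q 0 == (2 : Int)) = true := by simp [h]
  simp only [pvB_run, List.filter_cons, hY, Bool.not_false, Bool.false_eq_true, if_true,
    if_false, List.map_cons, pvB_lower, pvB_upper, List.foldl_cons, pvB_lowerStep,
    pvB_upperStep, h0, ite_true]
  rw [pv_lower_fst n _ _ _ true, pv_lower_snd n]
  simp only [beq_iff_eq]
  by_cases hc : 0 ≤ (if sx = 0 then sx else sx + pvB_getQ q 1) ∧
      (if sx = 0 then sx else sx + pvB_getQ q 1) < n
  · obtain ⟨hc1, hc2⟩ := hc
    simp [hc1, hc2, pvB_run, pvB_lower, pvB_upper]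
  · have hcf : (decide (0 ≤ if sx = 0 then sx else sx + pvB_getQ q 1) &&
        decide ((if sx = 0 then sx else sx + pvB_getQ q 1) < n)) = false := by
      by_cases h1 : 0 ≤ if sx = 0 then sx else sx + pvB_getQ q 1
      · by_cases h2 : (if sx = 0 then sx else sx + pvB_getQ q 1) < n
        · exact absurd ⟨h1, h2⟩ hc
        · simp [h2]
      · simp [h1]
    simp [hcf, hc]

theorem pvB_run_cons_xminus (n m : Int) (q : List Int) (rest : List (List Int))
    (sx ex sy ey : Int) (hY : pvB_isY q = false) (h : (pvB_getQ q 0 == (2 : Int)) = false) :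
    pvB_run n m (q :: rest) sx ex sy ey =
      (let dx := pvB_getQ q 1
       let nex := if ex = n - 1 then ex else ex - dx
       if 0 ≤ nex ∧ nex < n then pvB_run n m rest (max 0 (sx - dx)) nex sy ey else 0) := by
  simp only [pvB_run, List.filter_cons, hY, Bool.not_false, Bool.false_eq_true, if_true,
    if_false, List.map_cons, pvB_lower, pvB_upper, List.foldl_cons, pvB_lowerStep,
    pvB_upperStep, h, ite_false, Bool.false_eq_true]
  rw [pv_upper_fst n _ _ _ true, pv_upper_snd n]
  simp only [beq_iff_eq]
  by_cases hc : 0 ≤ (if ex = n - 1 then ex else ex - pvB_getQ q 1) ∧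
      (if ex = n - 1 then ex else ex - pvB_getQ q 1) < n
  · obtain ⟨hc1, hc2⟩ := hc
    simp [hc1, hc2, pvB_run, pvB_lower, pvB_upper]
  · have hcf : (decide (0 ≤ if ex = n - 1 then ex else ex - pvB_getQ q 1) &&
        decide ((if ex = n - 1 then ex else ex - pvB_getQ q 1) < n)) = false := by
      by_cases h1 : 0 ≤ if ex = n - 1 then ex else ex - pvB_getQ q 1
      · by_cases h2 : (if ex = n - 1 then ex else ex - pvB_getQ q 1) < n
        · exact absurd ⟨h1, h2⟩ hc
        · simp [h2]
      · simp [h1]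
    simp [hcf, hc]

theorem pv_key (n m : Int) (qs : List (List Int)) : ∀ (sx ex sy ey : Int),
    pvA_loop n m qs sx ex sy ey = pvB_run n m qs sx ex sy ey := by
  induction qs with
  | nil => intro sx ex sy ey; simp [pvA_loop, pvB_run, pvB_lower, pvB_upper]
  | cons q rest ih =>
    intro sx ex sy ey
    by_cases h0 : pvGetQ q 0 = 0
    · rw [pvB_run_cons_yplus n m q rest sx ex sy ey h0]
      have hf : (pvGetQ q 0 == (0 : Int)) = true := by simp [h0]
      simp only [pvA_loop, hf, ite_true, pvB_getQ_eq, beq_iff_eq]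
      by_cases hsy : sy = 0 <;>
        simp [hsy] <;>
        split_ifs <;>
        first
          | rfl
          | exact ih _ _ _ _
          | (rw [min_eq_left (by omega)]; exact ih _ _ _ _)
          | tauto
    · by_cases h1 : pvGetQ q 0 = 1
      · rw [pvB_run_cons_yminus n m q rest sx ex sy ey h1]
        have hf0 : (pvGetQ q 0 == (0 : Int)) = false := by simp [h0]
        have hf1 : (pvGetQ q 0 == (1 : Int)) = true := by simp [h1]
        simp only [pvA_loop, hf0, hf1, ite_true, ite_false, Bool.false_eq_true,
          pvB_getQ_eq, beq_iff_eq]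
        by_cases hey : ey = m - 1 <;>
          simp [hey] <;>
          split_ifs <;>
          first
            | rfl
            | exact ih _ _ _ _
            | (rw [max_eq_right (by omega)]; exact ih _ _ _ _)
            | tauto
      · by_cases h2 : pvGetQ q 0 = 2
        · have hY : pvB_isY q = false := by simp [pvB_isY, pvB_getQ_eq, h0, h1]
          rw [pvB_run_cons_xplus n m q rest sx ex sy ey hY h2]
          have hf0 : (pvGetQ q 0 == (0 : Int)) = false := by simp [h0]
          have hf1 : (pvGetQ q 0 == (1 : Int)) = false := by simp [h1]
          have hf2 : (pvGetQ q 0 == (2 : Int)) = true := by simp [h2]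
          simp only [pvA_loop, hf0, hf1, hf2, ite_true, ite_false, Bool.false_eq_true,
            pvB_getQ_eq, beq_iff_eq]
          by_cases hsx : sx = 0 <;>
            simp [hsx] <;>
            split_ifs <;>
            first
              | rfl
              | exact ih _ _ _ _
              | (rw [min_eq_left (by omega)]; exact ih _ _ _ _)
              | tauto
        · have hY : pvB_isY q = false := by simp [pvB_isY, pvB_getQ_eq, h0, h1]
          have hf2 : (pvB_getQ q 0 == (2 : Int)) = false := by
            simp [pvB_getQ_eq, h2]
          rw [pvB_run_cons_xminus n m q rest sx ex sy ey hY hf2]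
          have hf0 : (pvGetQ q 0 == (0 : Int)) = false := by simp [h0]
          have hf1 : (pvGetQ q 0 == (1 : Int)) = false := by simp [h1]
          have hf2' : (pvGetQ q 0 == (2 : Int)) = false := by simp [h2]
          simp only [pvA_loop, hf0, hf1, hf2', ite_true, ite_false, Bool.false_eq_true,
            pvB_getQ_eq, beq_iff_eq]
          by_cases hex : ex = n - 1 <;>
            simp [hex] <;>
            split_ifs <;>
            first
              | rfl
              | exact ih _ _ _ _
              | (rw [max_eq_right (by omega)]; exact ih _ _ _ _)
              | tauto

-- ===== VERDICT (by name: the statement is the Claim_ definition above) =====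
theorem solution_spec : Claim_equal_solution := by
  intro n m x y queries _ _
  unfold Spec_solution solution solution_alt
  rw [pv_key]
  simp [pvB_run]
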